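-- pv_equiv track=rewrite | github.com/selinderin/ROS2 | HW4/action_server.py | find_pair_with_smallest_sum
-- ===== SOURCE A (Python) =====
-- def find_pair_with_smallest_sum(numbers):
--     min_sum = None
--     pair = None
--
--     for i in range(len(numbers)):
--         for j in range(i + 1, len(numbers)):
--             total = numbers[i] + numbers[j]
--
--             if min_sum is None or total < min_sum:
--                 min_sum = total
--                 pair = (min(numbers[i], numbers[j]), max(numbers[i], numbers[j]))
--
--     return pair
-- ===== SOURCE B (Python) =====
-- def find_pair_with_smallest_sum(numbers):
--     if len(numbers) < 2:
--         return None
--     s = sorted(numbers)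
--     return (s[0], s[1])
-- ===== Notes on version B (the rewrite author's own statement) =====
-- stated objective: simpler
-- what changed: Replaces the all-pairs nested scan with sort-then-read: the minimal-sum pair is always the two smallest values, returned in ascending order, so B sorts once and returns the first two elements.
import Mathlib
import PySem

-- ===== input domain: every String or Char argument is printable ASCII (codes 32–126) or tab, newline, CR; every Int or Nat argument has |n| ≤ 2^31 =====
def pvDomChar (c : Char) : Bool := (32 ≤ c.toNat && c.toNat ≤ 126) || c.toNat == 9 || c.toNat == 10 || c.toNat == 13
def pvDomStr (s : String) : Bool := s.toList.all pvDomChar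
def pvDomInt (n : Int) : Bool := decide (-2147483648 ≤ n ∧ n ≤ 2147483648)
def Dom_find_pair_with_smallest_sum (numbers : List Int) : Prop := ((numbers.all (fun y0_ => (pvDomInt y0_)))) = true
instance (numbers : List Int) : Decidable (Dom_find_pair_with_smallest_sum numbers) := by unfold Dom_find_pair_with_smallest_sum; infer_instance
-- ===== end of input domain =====

-- B replaces A's all-pairs nested scan with sort-then-read (the minimal-sum pair is the two
-- smallest values, returned in ascending order): simpler and asymptotically faster.

-- ===== PORT A =====
-- literal transliteration of A's nested index loops; mutable state (min_sum, pair)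
def find_pair_with_smallest_sum (numbers : List Int) : Option (List Int) :=
  let st : Option Int × Option (List Int) :=
    (PySem.List.pyRange 0 (PySem.List.len numbers) 1).foldl
      (fun st i =>
        (PySem.List.pyRange (i + 1) (PySem.List.len numbers) 1).foldl
          (fun st j =>
            let total := PySem.List.pyGetD numbers i 0 + PySem.List.pyGetD numbers j 0
            match st.1 with
            | none => (some total,
                some [min (PySem.List.pyGetD numbers i 0) (PySem.List.pyGetD numbers j 0),
                      max (PySem.List.pyGetD numbers i 0) (PySem.List.pyGetD numbers j 0)])
            | some m =>
                if total < m then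
                  (some total,
                   some [min (PySem.List.pyGetD numbers i 0) (PySem.List.pyGetD numbers j 0),
                         max (PySem.List.pyGetD numbers i 0) (PySem.List.pyGetD numbers j 0)])
                else st)
          st)
      (none, none)
  st.2

-- ===== PORT B =====
def find_pair_with_smallest_sum_alt (numbers : List Int) : Option (List Int) :=
  if PySem.List.len numbers < 2 then none
  else
    let s := PySem.List.sorted numbers (fun x => x) false
    some [PySem.List.pyGetD s 0 0, PySem.List.pyGetD s 1 0]

-- ===== PRECONDITION & SPEC =====
def Spec_find_pair_with_smallest_sum (numbers : List Int) (out : Option (List Int)) : Prop := out = find_pair_with_smallest_sum_alt numbers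
instance (numbers : List Int) (out : Option (List Int)) : Decidable (Spec_find_pair_with_smallest_sum numbers out) := by unfold Spec_find_pair_with_smallest_sum; infer_instance

-- ===== CLAIM (what is proved, stated in full; the proofs are below) =====
def Claim_equal_find_pair_with_smallest_sum : Prop := ∀ (numbers : List Int), Dom_find_pair_with_smallest_sum numbers → Spec_find_pair_with_smallest_sum numbers (find_pair_with_smallest_sum numbers)

-- ===== LEMMAS AND PROOFS =====

-- A's loop state and step, as proof abbreviations
def pvStep (st : Option Int × Option (List Int)) (q : Int × Int) :
    Option Int × Option (List Int) :=
  match st.1 with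
  | none => (some (q.1 + q.2), some [min q.1 q.2, max q.1 q.2])
  | some m =>
      if q.1 + q.2 < m then (some (q.1 + q.2), some [min q.1 q.2, max q.1 q.2]) else st

-- all ordered pairs (earlier, later) of a list, in A's traversal order
def pvPairs : List Int → List (Int × Int)
  | [] => []
  | x :: xs => xs.map (fun y => (x, y)) ++ pvPairs xs

theorem pvPairs_cons (x : Int) (xs : List Int) :
    pvPairs (x :: xs) = xs.map (fun y => (x, y)) ++ pvPairs xs := rfl

-- the inner loop of A, for outer index k, equals a fold of pvStep over pairs (l[k], ·)
theorem pvInner (l : List Int) (k : Nat) (hk : k < l.length)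
    (st : Option Int × Option (List Int)) :
    (PySem.List.pyRange ((k : Int) + 1) (PySem.List.len l) 1).foldl
      (fun st j =>
            match st.1 with
            | none => ((some (PySem.List.pyGetD l (k : Int) 0 + PySem.List.pyGetD l j 0) : Option Int),
                some [min (PySem.List.pyGetD l (k : Int) 0) (PySem.List.pyGetD l j 0),
                      max (PySem.List.pyGetD l (k : Int) 0) (PySem.List.pyGetD l j 0)])
            | some m =>
                if PySem.List.pyGetD l (k : Int) 0 + PySem.List.pyGetD l j 0 < m then
                  (some (PySem.List.pyGetD l (k : Int) 0 + PySem.List.pyGetD l j 0),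
                   some [min (PySem.List.pyGetD l (k : Int) 0) (PySem.List.pyGetD l j 0),
                         max (PySem.List.pyGetD l (k : Int) 0) (PySem.List.pyGetD l j 0)])
                else st) st
    = ((l.drop (k + 1)).map (fun y => (l[k], y))).foldl pvStep st := by
  have h0 : (0 : Int) ≤ (k : Int) + 1 := by omega
  have h := PySem.List.foldl_pyRange_pyGetD l 0
    (fun st y => pvStep st (l[k], y)) st (a := (k : Int) + 1) h0
  rw [List.foldl_map]
  rw [show ((k : Int) + 1).toNat = k + 1 from by omega] at h
  rw [← h]
  apply PySem.List.foldl_congr_mem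
  intro acc j _
  rcases acc with ⟨ms, pr⟩
  cases ms <;> simp [pvStep, List.getElem?_eq_getElem hk]

-- the whole double loop of A is a single fold of pvStep over pvPairs
theorem pvOuter (l : List Int) :
    ∀ (k : Nat), k ≤ l.length → ∀ (st : Option Int × Option (List Int)),
    (PySem.List.pyRange (k : Int) (PySem.List.len l) 1).foldl
      (fun st i =>
        (PySem.List.pyRange (i + 1) (PySem.List.len l) 1).foldl
          (fun st j =>
            match st.1 with
            | none => ((some (PySem.List.pyGetD l i 0 + PySem.List.pyGetD l j 0) : Option Int),
                some [min (PySem.List.pyGetD l i 0) (PySem.List.pyGetD l j 0),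
                      max (PySem.List.pyGetD l i 0) (PySem.List.pyGetD l j 0)])
            | some m =>
                if PySem.List.pyGetD l i 0 + PySem.List.pyGetD l j 0 < m then
                  (some (PySem.List.pyGetD l i 0 + PySem.List.pyGetD l j 0),
                   some [min (PySem.List.pyGetD l i 0) (PySem.List.pyGetD l j 0),
                         max (PySem.List.pyGetD l i 0) (PySem.List.pyGetD l j 0)])
                else st) st) st
    = (pvPairs (l.drop k)).foldl pvStep st := by
  intro k
  induction hn : l.length - k generalizing k with
  | zero =>
      intro hk st
      rw [PySem.List.pyRange_one_eq_nil (by simp [PySem.List.len_eq]; omega)]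
      simp [List.drop_eq_nil_of_le (by omega : l.length ≤ k), pvPairs]
  | succ n ih =>
      intro hk st
      have hklt : k < l.length := by omega
      rw [PySem.List.pyRange_one_cons (by simp [PySem.List.len_eq]; exact_mod_cast hklt)]
      rw [List.foldl_cons]
      have hdrop : l.drop k = l[k] :: l.drop (k + 1) := List.drop_eq_getElem_cons hklt
      rw [pvInner l k hklt st]
      rw [show ((k : Int) + 1) = ((k + 1 : Nat) : Int) from by push_cast; ring]
      rw [ih (k + 1) (by omega) (by omega)]
      rw [hdrop, pvPairs_cons, List.foldl_append]

-- running-minimum characterisation of the flat fold, from a some-state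
theorem pvFold_some (ps : List (Int × Int)) :
    ∀ (m : Int) (pr : List Int), ∃ m' pr',
      ps.foldl pvStep (some m, some pr) = (some m', some pr') ∧ m' ≤ m ∧
      (∀ q ∈ ps, m' ≤ q.1 + q.2) ∧
      ((m' = m ∧ pr' = pr) ∨ ∃ q ∈ ps, q.1 + q.2 = m' ∧ pr' = [min q.1 q.2, max q.1 q.2]) := by
  induction ps with
  | nil => intro m pr; exact ⟨m, pr, rfl, le_refl _, by simp, Or.inl ⟨rfl, rfl⟩⟩
  | cons q rest ih =>
      intro m pr
      by_cases h : q.1 + q.2 < m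
      · obtain ⟨m', pr', heq, hle, hall, hcase⟩ := ih (q.1 + q.2) [min q.1 q.2, max q.1 q.2]
        refine ⟨m', pr', ?_, by omega, ?_, ?_⟩
        · simpa [pvStep, h] using heq
        · intro r hr
          rcases List.mem_cons.mp hr with h' | h'
          · subst h'; omega
          · exact hall r h'
        · rcases hcase with ⟨h1, h2⟩ | ⟨r, hr, h1, h2⟩
          · exact Or.inr ⟨q, List.mem_cons_self, by omega, h2⟩
          · exact Or.inr ⟨r, List.mem_cons_of_mem _ hr, h1, h2⟩
      · obtain ⟨m', pr', heq, hle, hall, hcase⟩ := ih m pr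
        refine ⟨m', pr', ?_, hle, ?_, ?_⟩
        · simpa [pvStep, h] using heq
        · intro r hr
          rcases List.mem_cons.mp hr with h' | h'
          · subst h'; omega
          · exact hall r h'
        · rcases hcase with ⟨h1, h2⟩ | ⟨r, hr, h1, h2⟩
          · exact Or.inl ⟨h1, h2⟩
          · exact Or.inr ⟨r, List.mem_cons_of_mem _ hr, h1, h2⟩

-- from the initial (none, none) state, on a nonempty pair list
theorem pvFold_characterisation (q : Int × Int) (rest : List (Int × Int)) :
    ∃ m pr, (q :: rest).foldl pvStep (none, none) = (some m, (some pr : Option (List Int))) ∧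
      (∀ r ∈ q :: rest, m ≤ r.1 + r.2) ∧
      ∃ r ∈ q :: rest, r.1 + r.2 = m ∧ pr = [min r.1 r.2, max r.1 r.2] := by
  obtain ⟨m', pr', heq, hle, hall, hcase⟩ := pvFold_some rest (q.1 + q.2) [min q.1 q.2, max q.1 q.2]
  refine ⟨m', pr', by simpa [pvStep] using heq, ?_, ?_⟩
  · intro r hr
    rcases List.mem_cons.mp hr with h' | h'
    · subst h'; omega
    · exact hall r h'
  · rcases hcase with ⟨h1, h2⟩ | ⟨r, hr, h1, h2⟩
    · exact ⟨q, List.mem_cons_self, by omega, h2⟩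
    · exact ⟨r, List.mem_cons_of_mem _ hr, h1, h2⟩

-- a pair of pvPairs is two elements at distinct positions
theorem pvPairs_perm (l : List Int) :
    ∀ q ∈ pvPairs l, ∃ w, l.Perm (q.1 :: q.2 :: w) := by
  induction l with
  | nil => simp [pvPairs]
  | cons a t ih =>
      intro q hq
      rw [pvPairs_cons, List.mem_append] at hq
      rcases hq with h | h
      · obtain ⟨y, hy, hqe⟩ := List.mem_map.mp h
        subst hqe
        exact ⟨t.erase y, List.Perm.cons a (List.perm_cons_erase hy)⟩
      · obtain ⟨w, hw⟩ := ih q h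
        exact ⟨a :: w, ((hw.cons a).trans (List.Perm.swap _ _ _)).trans
          ((List.Perm.swap _ _ _).cons q.1)⟩

-- conversely: two elements at distinct positions give a member of pvPairs (up to order)
theorem pvPairs_of_mem_erase (l : List Int) :
    ∀ (x y : Int), x ∈ l → y ∈ l.erase x →
      ∃ q ∈ pvPairs l, q = (x, y) ∨ q = (y, x) := by
  induction l with
  | nil => simp
  | cons a t ih =>
      intro x y hx hy
      by_cases hax : a = x
      · subst hax
        rw [List.erase_cons_head] at hy
        refine ⟨(a, y), ?_, Or.inl rfl⟩
        rw [pvPairs_cons]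
        exact List.mem_append_left _ (List.mem_map.mpr ⟨y, hy, rfl⟩)
      · have hxt : x ∈ t := by
          rcases List.mem_cons.mp hx with h | h
          · exact absurd h.symm hax
          · exact h
        rw [List.erase_cons_tail (by simpa using hax)] at hy
        rcases List.mem_cons.mp hy with h | h
        · subst h
          refine ⟨(y, x), ?_, Or.inr rfl⟩
          rw [pvPairs_cons]
          exact List.mem_append_left _ (List.mem_map.mpr ⟨x, hxt, rfl⟩)
        · obtain ⟨q, hq, hqe⟩ := ih x y hxt h
          refine ⟨q, ?_, hqe⟩
          rw [pvPairs_cons]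
          exact List.mem_append_right _ hq

-- the two smallest values bound every pair of distinct positions from below
theorem pvTwoSmallest (s0 s1 : Int) (t : List Int)
    (hpw : (s0 :: s1 :: t).Pairwise (· ≤ ·))
    (u v : Int) (w : List Int) (hperm : (s0 :: s1 :: t).Perm (u :: v :: w)) :
    s0 ≤ min u v ∧ s1 ≤ max u v := by
  have hmem : ∀ z ∈ s0 :: s1 :: t, s0 ≤ z := by
    intro z hz
    rcases List.mem_cons.mp hz with h | h
    · omega
    · exact (List.pairwise_cons.mp hpw).1 z h
  have hu : u ∈ s0 :: s1 :: t := hperm.mem_iff.mpr List.mem_cons_self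
  have hv : v ∈ s0 :: s1 :: t := hperm.mem_iff.mpr (List.mem_cons_of_mem _ List.mem_cons_self)
  refine ⟨le_min (hmem u hu) (hmem v hv), ?_⟩
  by_contra hlt
  rw [not_le] at hlt
  have hu1 : u < s1 := by have := le_max_left u v; omega
  have hv1 : v < s1 := by have := le_max_right u v; omega
  have hcnt := hperm.countP_eq (fun z => decide (z < s1))
  have h1 : ∀ z ∈ s1 :: t, s1 ≤ z := by
    intro z hz
    rcases List.mem_cons.mp hz with h | h
    · omega
    · exact (List.pairwise_cons.mp (List.pairwise_cons.mp hpw).2).1 z h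
  have hz : (s1 :: t).countP (fun z => decide (z < s1)) = 0 := by
    rw [List.countP_eq_zero]
    intro z hz
    simpa using not_lt.mpr (h1 z hz)
  have hLe : (s0 :: s1 :: t).countP (fun z => decide (z < s1)) ≤ 1 := by
    rw [List.countP_cons, hz]
    split; omega; omega
  have hGe : 2 ≤ (u :: v :: w).countP (fun z => decide (z < s1)) := by
    rw [List.countP_cons, List.countP_cons]
    simp only [hu1, hv1, decide_true, if_pos]
    omega
  omega

-- B's port reads the first two elements of the sorted list
theorem pvAlt_eq (l : List Int) (s0 s1 : Int) (t : List Int)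
    (hs : PySem.List.sorted l (fun x => x) false = s0 :: s1 :: t) :
    find_pair_with_smallest_sum_alt l = some [s0, s1] := by
  have hlen2 := PySem.List.length_sorted l (fun x => x) false
  rw [hs] at hlen2
  simp only [List.length_cons] at hlen2
  have hlen : ¬ PySem.List.len l < 2 := by
    simp only [PySem.List.len_eq]
    omega
  simp only [find_pair_with_smallest_sum_alt, hlen, if_false, hs]
  rw [show (0 : Int) = ((0 : Nat) : Int) from rfl, show (1 : Int) = ((1 : Nat) : Int) from rfl,
      PySem.List.pyGetD_natCast, PySem.List.pyGetD_natCast]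
  rfl

-- A's port equals the flat fold over pvPairs
theorem pvA_eq_fold (l : List Int) :
    find_pair_with_smallest_sum l = ((pvPairs l).foldl pvStep (none, none)).2 := by
  have h := pvOuter l 0 (Nat.zero_le _) (none, none)
  simp only [Nat.cast_zero, List.drop_zero] at h
  exact congrArg Prod.snd h

-- ===== VERDICT (by name: the statement is the Claim_ definition above) =====
theorem find_pair_with_smallest_sum_spec : Claim_equal_find_pair_with_smallest_sum := by
  unfold Claim_equal_find_pair_with_smallest_sum
  intro l _
  unfold Spec_find_pair_with_smallest_sum
  rw [pvA_eq_fold]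
  obtain _ | ⟨a, _ | ⟨b, r⟩⟩ := l
  · simp [pvPairs, find_pair_with_smallest_sum_alt, PySem.List.len_eq]
  · simp [pvPairs, find_pair_with_smallest_sum_alt, PySem.List.len_eq]
  · have hperm := PySem.List.sorted_perm (a :: b :: r) (fun x => x) false
    have hpw : (PySem.List.sorted (a :: b :: r) (fun x => x) false).Pairwise (· ≤ ·) := by
      simpa using PySem.List.sorted_pairwise (a :: b :: r) (fun x => x)
    obtain ⟨s0, s1, t, hs⟩ : ∃ s0 s1 t,
        PySem.List.sorted (a :: b :: r) (fun x => x) false = s0 :: s1 :: t := by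
      have hlen := PySem.List.length_sorted (a :: b :: r) (fun x => x) false
      match h : PySem.List.sorted (a :: b :: r) (fun x => x) false with
      | [] => rw [h] at hlen; simp at hlen
      | [x] => rw [h] at hlen; simp at hlen
      | s0 :: s1 :: t => exact ⟨s0, s1, t, rfl⟩
    rw [hs] at hperm hpw
    -- pvPairs (a :: b :: r) is nonempty: (a, b) is its head
    have hpp : pvPairs (a :: b :: r)
        = (a, b) :: (r.map (fun y => (a, y)) ++ pvPairs (b :: r)) := by
      rw [pvPairs_cons, pvPairs_cons]; simp
    obtain ⟨m, pr, heq, hmin, q, hq, hqm, hqpr⟩ :=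
      pvFold_characterisation (a, b) (r.map (fun y => (a, y)) ++ pvPairs (b :: r))
    rw [hpp, heq]
    -- some pair of the list has values s0, s1 (sum s0 + s1), so m ≤ s0 + s1
    have hs0 : s0 ∈ a :: b :: r := hperm.mem_iff.mp List.mem_cons_self
    have hs1 : s1 ∈ (a :: b :: r).erase s0 := by
      have h1 : (s0 :: s1 :: t).Perm (s0 :: (a :: b :: r).erase s0) :=
        hperm.trans (List.perm_cons_erase hs0)
      exact h1.cons_inv.mem_iff.mp List.mem_cons_self
    obtain ⟨q0, hq0, hq0e⟩ := pvPairs_of_mem_erase (a :: b :: r) s0 s1 hs0 hs1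
    rw [hpp] at hq0
    have hq0sum : q0.1 + q0.2 = s0 + s1 := by
      rcases hq0e with h | h
      · rw [h]
      · rw [h]; ring
    have hmle : m ≤ s0 + s1 := by
      have := hmin q0 hq0
      omega
    -- the achiever q is two elements at distinct positions, so s0 + s1 ≤ m; values pin down
    obtain ⟨w, hw⟩ := pvPairs_perm (a :: b :: r) q (by rw [hpp]; exact hq)
    have hbnd := pvTwoSmallest s0 s1 t hpw q.1 q.2 w (hperm.trans hw)
    have hsum : min q.1 q.2 + max q.1 q.2 = q.1 + q.2 := min_add_max _ _
    have hvals : min q.1 q.2 = s0 ∧ max q.1 q.2 = s1 := by omega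
    rw [pvAlt_eq (a :: b :: r) s0 s1 t hs, hqpr, hvals.1, hvals.2]
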